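-- pv_equiv track=rewrite | github.com/poschi3/AdventOfCode2015 | day11/day11.py | isEnoughDouble
-- ===== SOURCE A (Python) =====
-- def isEnoughDouble(password):
--     last = ""
--     count = 0
--
--     for c in password:
--         if c == last:
--             count += 1
--             last = ""
--         else:
--             last = c
--     return count >= 2
-- ===== SOURCE B (Python) =====
-- def isEnoughDouble(password):
--     # Run-length decomposition: split the string into maximal runs of equal
--     # characters; a run of length m contributes m // 2 non-overlapping doubles.
--     runs = []
--     s = password
--     while s:
--         i = 1
--         while i < len(s) and s[i] == s[0]:
--             i += 1
--         runs.append(i)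
--         s = s[i:]
--     return sum(m // 2 for m in runs) >= 2
-- ===== Notes on version B (the rewrite author's own statement) =====
-- stated objective: alternative
-- what changed: Replaces A's one-pass reset-after-match state machine by a run-length decomposition: the string is recursively split into maximal runs of equal characters and the answer is whether the sum of floor(run_length/2) over the runs reaches 2.
import Mathlib
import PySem

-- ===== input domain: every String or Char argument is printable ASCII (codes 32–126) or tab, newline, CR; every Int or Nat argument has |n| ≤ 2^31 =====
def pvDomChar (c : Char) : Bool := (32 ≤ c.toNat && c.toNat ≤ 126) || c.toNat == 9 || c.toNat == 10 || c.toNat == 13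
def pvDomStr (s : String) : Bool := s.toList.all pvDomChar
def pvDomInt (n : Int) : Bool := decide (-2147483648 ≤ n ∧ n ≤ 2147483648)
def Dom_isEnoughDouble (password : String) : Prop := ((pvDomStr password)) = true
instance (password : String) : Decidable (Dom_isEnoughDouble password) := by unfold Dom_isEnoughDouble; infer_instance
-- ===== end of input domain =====

-- B replaces A's reset-after-match state machine by a run-length decomposition
-- (split into maximal runs, sum floor(len/2) per run): alternative algorithm, same result.


-- ===== PORT A =====
-- loop over the characters: state = (last, count); 'last = ""' is modelled as none,
-- 'last = c' as some c (faithful: Python's c == "" is always false for a char of the string)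
def pvALoop : List Char → Option Char → Int → Int
  | [], _, count => count
  | c :: rest, last, count =>
    if some c == last then pvALoop rest none (count + 1)
    else pvALoop rest (some c) count

def isEnoughDouble (password : String) : Bool :=
  decide (pvALoop password.toList none 0 ≥ 2)

-- ===== PORT B =====
-- Source B's inner while loop 'i = 1; while i < len(s) and s[i] == s[0]: i += 1':
-- counts how many further characters equal the head, returning (extra, remainder).
def pvLead (c : Char) : List Char → Nat × List Char
  | [] => (0, [])
  | d :: rest =>
    if d == c then
      let (n, r) := pvLead c rest
      (n + 1, r)
    else (0, d :: rest)

theorem pvLead_len (c : Char) : ∀ l : List Char, (pvLead c l).2.length ≤ l.length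
  | [] => by simp [pvLead]
  | d :: rest => by
    have := pvLead_len c rest
    by_cases h : d = c
    · simp only [pvLead, h, beq_self_eq_true, if_true, List.length_cons]
      omega
    · simp [pvLead, h]

-- Source B's run_lengths: head run has length i = 1 + extra, recurse on the remainder s[i:]
def pvRunLengths : List Char → List Int
  | [] => []
  | c :: rest =>
    (((pvLead c rest).1 : Int) + 1) :: pvRunLengths (pvLead c rest).2
termination_by l => l.length
decreasing_by
  have h1 := pvLead_len c rest
  have h2 : (c :: rest).length = rest.length + 1 := by simp
  omega

-- sum(m // 2 for m in run_lengths(password))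
def pvSumHalves (l : List Int) : Int :=
  l.foldl (fun acc m => acc + PySem.Int.floordiv m 2) 0

def isEnoughDouble_alt (password : String) : Bool :=
  decide (pvSumHalves (pvRunLengths password.toList) ≥ 2)

-- ===== PRECONDITION & SPEC =====
def Spec_isEnoughDouble (password : String) (out : Bool) : Prop := out = isEnoughDouble_alt password
instance (password : String) (out : Bool) : Decidable (Spec_isEnoughDouble password out) := by unfold Spec_isEnoughDouble; infer_instance

-- ===== CLAIM (what is proved, stated in full; the proofs are below) =====
def Claim_equal_isEnoughDouble : Prop := ∀ (password : String), Dom_isEnoughDouble password → Spec_isEnoughDouble password (isEnoughDouble password)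

-- ===== LEMMAS AND PROOFS =====
theorem pvSumHalves_shift (f : Int → Int) (l : List Int) (a : Int) :
    l.foldl (fun acc m => acc + f m) a = a + l.foldl (fun acc m => acc + f m) 0 := by
  induction l generalizing a with
  | nil => simp
  | cons x xs ih =>
    simp only [List.foldl_cons]
    rw [ih (a + f x), ih (0 + f x)]
    ring

theorem pvSumHalves_cons (x : Int) (xs : List Int) :
    pvSumHalves (x :: xs) = PySem.Int.floordiv x 2 + pvSumHalves xs := by
  unfold pvSumHalves
  simp only [List.foldl_cons]
  rw [pvSumHalves_shift (fun m => PySem.Int.floordiv m 2) xs]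
  ring_nf

theorem pvFloordiv_succ (m : Nat) :
    PySem.Int.floordiv ((m : Int) + 1) 2 = (((m + 1) / 2 : Nat) : Int) := by
  rw [PySem.Int.floordiv_eq_ediv_of_pos (by norm_num)]
  omega

-- processing a run: with state 'some c', the first n equal chars contribute (n+1)/2 matches
theorem pvA_run_fuel (fuel : Nat) : ∀ (rest : List Char), rest.length ≤ fuel → ∀ (c : Char) (k : Int),
    pvALoop rest (some c) k =
      pvALoop (pvLead c rest).2 none (k + (((pvLead c rest).1 + 1) / 2 : Nat)) := by
  induction fuel with
  | zero =>
    intro rest hlen c k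
    have : rest = [] := List.eq_nil_of_length_eq_zero (Nat.le_zero.mp hlen)
    subst this
    simp [pvALoop, pvLead]
  | succ n ih =>
    intro rest hlen c k
    match rest with
    | [] => simp [pvALoop, pvLead]
    | d :: rest' =>
      by_cases hdc : d = c
      · subst hdc
        match rest' with
        | [] => simp [pvALoop, pvLead]
        | e :: r2 =>
          by_cases hed : e = d
          · subst hed
            have h2 : r2.length ≤ n := by
              simp only [List.length_cons] at hlen
              omega
            simp only [pvALoop, pvLead, beq_self_eq_true, if_true]
            rw [if_neg (by simp)]
            rw [ih r2 h2 e (k + 1)]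
            congr 1
            push_cast
            omega
          · simp [pvALoop, pvLead, hed]
      · simp [pvALoop, pvLead, hdc]

theorem pvA_run (rest : List Char) (c : Char) (k : Int) :
    pvALoop rest (some c) k =
      pvALoop (pvLead c rest).2 none (k + (((pvLead c rest).1 + 1) / 2 : Nat)) :=
  pvA_run_fuel rest.length rest le_rfl c k

theorem pvKey_fuel (fuel : Nat) : ∀ (l : List Char), l.length ≤ fuel → ∀ (k : Int),
    pvALoop l none k = k + pvSumHalves (pvRunLengths l) := by
  induction fuel with
  | zero =>
    intro l hlen k
    have : l = [] := List.eq_nil_of_length_eq_zero (Nat.le_zero.mp hlen)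
    subst this
    simp [pvALoop, pvRunLengths, pvSumHalves]
  | succ n ih =>
    intro l hlen k
    match l with
    | [] => simp [pvALoop, pvRunLengths, pvSumHalves]
    | c :: rest =>
      simp only [pvALoop]
      rw [if_neg (by simp)]
      rw [pvA_run rest c k]
      have hlen2 : (pvLead c rest).2.length ≤ n := by
        have := pvLead_len c rest
        simp only [List.length_cons] at hlen
        omega
      rw [ih (pvLead c rest).2 hlen2]
      rw [pvRunLengths]
      rw [pvSumHalves_cons, pvFloordiv_succ]
      push_cast
      ring_nf

-- ===== VERDICT (by name: the statement is the Claim_ definition above) =====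
theorem isEnoughDouble_spec : Claim_equal_isEnoughDouble := by
  intro password _
  unfold Spec_isEnoughDouble isEnoughDouble isEnoughDouble_alt
  rw [pvKey_fuel password.toList.length password.toList le_rfl]
  simp
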